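-- pv_equiv track=rewrite | github.com/DrDonut326/AdventofCode | 2016/Day 4.py | sort_top_5
-- ===== SOURCE A (Python) =====
-- from collections import defaultdict, deque
--
-- def sort_top_5(line):
--     splits = defaultdict(list)
--     for x in line:
--         splits[x[1]].append(x)
--     for values in splits.values():
--         values.sort(key=lambda x: x[0])
--     keyvals = [x for x in splits.keys()]
--     keyvals.sort(reverse=True)
--     ans = []
--     for x in keyvals:
--         ans += splits[x]
--     super_ans = ''
--     for x in ans:
--         super_ans += x[0]
--     return super_ans
-- ===== SOURCE B (Python) =====
-- def sort_top_5(line):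
--     tmp = sorted(line, key=lambda x: x[0])
--     tmp.sort(key=lambda x: x[1], reverse=True)
--     return ''.join(x[0] for x in tmp)
-- ===== Notes on version B (the rewrite author's own statement) =====
-- stated objective: simpler
-- what changed: Replaces the defaultdict grouping table, the per-group sort loop, the key sort and the merge loop with two stable sorts of the whole list (ascending by name, then descending by count) followed by a single join, relying on sort stability to reproduce the grouped order.
import Mathlib
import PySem

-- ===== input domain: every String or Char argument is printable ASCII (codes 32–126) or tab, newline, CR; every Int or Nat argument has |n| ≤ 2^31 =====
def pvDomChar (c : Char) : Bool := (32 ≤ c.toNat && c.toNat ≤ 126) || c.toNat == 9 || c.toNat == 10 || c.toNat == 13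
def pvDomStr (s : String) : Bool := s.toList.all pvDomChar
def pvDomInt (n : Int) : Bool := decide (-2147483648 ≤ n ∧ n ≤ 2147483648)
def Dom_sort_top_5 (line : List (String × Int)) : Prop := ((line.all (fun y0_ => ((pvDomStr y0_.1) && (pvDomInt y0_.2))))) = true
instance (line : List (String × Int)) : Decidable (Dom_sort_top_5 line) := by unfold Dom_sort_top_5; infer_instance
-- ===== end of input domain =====

-- B replaces A's defaultdict grouping, per-group sorting and merge loops by two stable
-- sorts of the whole list followed by one join (objective: simpler).

-- ===== PORT A =====
-- splits[x[1]].append(x) grouping loop; then each value list sorted in place by x[0];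
-- keys sorted descending; groups concatenated; first components concatenated.
def sort_top_5 (line : List (String × Int)) : String :=
  let splits := line.foldl (fun d x => d.modify x.2 [] (fun v => v ++ [x])) PySem.Dict.empty
  let splits2 := PySem.Dict.mk (splits.items.map
    (fun p => (p.1, PySem.List.sorted p.2 (fun x => x.1) false)))
  let keyvals := PySem.List.sorted splits2.keys (fun x => x) true
  let ans := keyvals.foldl (fun a k => a ++ splits2.getD k []) []
  ans.foldl (fun s x => s ++ x.1) ""

-- ===== PORT B =====
-- tmp = sorted(line, key=x[0]); tmp.sort(key=x[1], reverse=True); ''.join(x[0] for x in tmp)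
def sort_top_5_alt (line : List (String × Int)) : String :=
  let tmp := PySem.List.sorted line (fun x => x.1) false
  let tmp2 := PySem.List.sorted tmp (fun x => x.2) true
  PySem.Str.join "" (tmp2.map (fun x => x.1))

-- ===== PRECONDITION & SPEC =====
def Spec_sort_top_5 (line : List (String × Int)) (out : String) : Prop := out = sort_top_5_alt line
instance (line : List (String × Int)) (out : String) : Decidable (Spec_sort_top_5 line out) := by unfold Spec_sort_top_5; infer_instance

-- ===== CLAIM (what is proved, stated in full; the proofs are below) =====
def Claim_equal_sort_top_5 : Prop := ∀ (line : List (String × Int)), Dom_sort_top_5 line → Spec_sort_top_5 line (sort_top_5 line)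

-- ===== LEMMAS AND PROOFS =====

theorem pvInsertBy_cons_of_head {α : Type} (bf : α → α → Bool) (x : α) (L : List α)
    (h : ∀ y ∈ L, bf x y = true) : PySem.List.insertBy bf x L = x :: L := by
  cases L with
  | nil => rfl
  | cons y ys => simp [PySem.List.insertBy, h y (by simp)]

theorem pvInsertBy_append_not {α : Type} (bf : α → α → Bool) (x : α) (L1 L2 : List α)
    (h : ∀ y ∈ L1, bf x y = false) :
    PySem.List.insertBy bf x (L1 ++ L2) = L1 ++ PySem.List.insertBy bf x L2 := by
  induction L1 with
  | nil => simp
  | cons y ys ih =>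
      simp only [List.cons_append, PySem.List.insertBy, h y (by simp)]
      simp only [Bool.false_eq_true, if_false, List.cons.injEq, true_and]
      exact ih (fun z hz => h z (by simp [hz]))

theorem pvSorted_rev_append {α κ : Type} [LT κ] [DecidableLT κ] (xs : List α) (x : α) (key : α → κ) :
    PySem.List.sorted (xs ++ [x]) key true
      = PySem.List.insertBy (fun a b => decide (key b < key a)) x (PySem.List.sorted xs key true) := by
  simp [PySem.List.sorted, List.foldl_append]

theorem pvSorted_asc_append {α κ : Type} [LT κ] [DecidableLT κ] (xs : List α) (x : α) (key : α → κ) :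
    PySem.List.sorted (xs ++ [x]) key false
      = PySem.List.insertBy (fun a b => decide (key a < key b)) x (PySem.List.sorted xs key false) := by
  simp [PySem.List.sorted, List.foldl_append]

theorem pvFilter_insertBy_pos {α : Type} (bf : α → α → Bool) (p : α → Bool) (x : α) (L : List α)
    (hL : L.Pairwise (fun a b => bf x a = true → bf x b = true)) (hpx : p x = true) :
    (PySem.List.insertBy bf x L).filter p = PySem.List.insertBy bf x (L.filter p) := by
  induction L with
  | nil => simp [PySem.List.insertBy, hpx]
  | cons y ys ih =>
      rcases List.pairwise_cons.mp hL with ⟨hy, hys⟩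
      by_cases hb : bf x y = true
      · by_cases hp : p y = true
        · simp [PySem.List.insertBy, hb, hp, hpx]
        · have hall : ∀ z ∈ ys.filter p, bf x z = true := by
            intro z hz; exact hy z (List.mem_of_mem_filter hz) hb
          simp only [PySem.List.insertBy, hb, if_true, List.filter_cons, hpx, hp]
          simp only [Bool.false_eq_true, if_false]
          rw [pvInsertBy_cons_of_head bf x (ys.filter p) hall]
      · simp only [PySem.List.insertBy, hb, if_false, Bool.false_eq_true]
        by_cases hp : p y = true
        · simp only [List.filter_cons, hp, if_true]
          rw [ih hys]
          simp [PySem.List.insertBy, hb]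
        · simp only [List.filter_cons, hp]
          simp only [Bool.false_eq_true, if_false]
          exact ih hys

theorem pvFilter_insertBy_neg {α : Type} (bf : α → α → Bool) (p : α → Bool) (x : α) (L : List α)
    (hpx : p x = false) :
    (PySem.List.insertBy bf x L).filter p = L.filter p := by
  induction L with
  | nil => simp [PySem.List.insertBy, hpx]
  | cons y ys ih =>
      by_cases hb : bf x y = true
      · simp [PySem.List.insertBy, hb, hpx]
      · simp only [PySem.List.insertBy, hb, Bool.false_eq_true, if_false, List.filter_cons]
        rw [ih]

theorem pvFilter_sorted {α κ : Type} [LinearOrder κ] (xs : List α) (key : α → κ) (p : α → Bool) :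
    (PySem.List.sorted xs key false).filter p = PySem.List.sorted (xs.filter p) key false := by
  induction xs using List.reverseRecOn with
  | nil => rfl
  | append_singleton ys x ih =>
      rw [pvSorted_asc_append, List.filter_append]
      by_cases hp : p x = true
      · have hL : (PySem.List.sorted ys key false).Pairwise
            (fun a b => (decide (key x < key a) = true) → (decide (key x < key b) = true)) := by
          refine (PySem.List.sorted_pairwise ys key).imp ?_
          intro a b hab ha
          simp only [decide_eq_true_eq] at *
          exact lt_of_lt_of_le ha hab
        rw [pvFilter_insertBy_pos _ p x _ hL hp, ih, List.filter_singleton, hp,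
          cond_true, pvSorted_asc_append]
      · rw [pvFilter_insertBy_neg _ p x _ (by simp [hp]), ih, List.filter_singleton,
          (by simp [hp] : p x = false), cond_false, List.append_nil]

theorem pvDescDropWhile_lt (c : Int) : ∀ (K : List Int), K.Pairwise (· > ·) → c ∉ K →
    ∀ d ∈ K.dropWhile (fun d => decide (c < d)), d < c := by
  intro K
  induction K with
  | nil => intro _ _ d hd; simp [List.dropWhile] at hd
  | cons k K' ih =>
      intro hp hc d hd
      rcases List.pairwise_cons.mp hp with ⟨hk, hp'⟩
      by_cases h : c < k
      · rw [List.dropWhile_cons_of_pos (by simpa using h)] at hd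
        exact ih hp' (fun hm => hc (List.mem_cons_of_mem _ hm)) d hd
      · rw [List.dropWhile_cons_of_neg (by simpa using h)] at hd
        have hkc : k < c := lt_of_le_of_ne (not_lt.mp h) (fun he => hc (by simp [he]))
        rcases List.mem_cons.mp hd with rfl | hd'
        · exact hkc
        · exact lt_trans (hk d hd') hkc

theorem pvSortedDescGt (S : List Int) (hn : S.Nodup) :
    (PySem.List.sorted S (fun x => x) true).Pairwise (· > ·) := by
  have h1 := PySem.List.sorted_pairwise_rev S (fun x => x)
  have h2 : (PySem.List.sorted S (fun x => x) true).Nodup :=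
    (PySem.List.sorted_perm S (fun x => x) true).nodup_iff.mpr hn
  exact (h1.and h2).imp (fun {a b} h => lt_of_le_of_ne h.1 (fun he => h.2 he.symm))

theorem pvSortedDesc_congr (S1 S2 : List Int) (hn1 : S1.Nodup) (hn2 : S2.Nodup)
    (h : ∀ a, a ∈ S1 ↔ a ∈ S2) :
    PySem.List.sorted S1 (fun x => x) true = PySem.List.sorted S2 (fun x => x) true := by
  apply PySem.List.sorted_rev_eq_of_perm_of_pairwise_gt
  · exact (PySem.List.sorted_perm S2 (fun x => x) true).trans
      ((List.perm_ext_iff_of_nodup hn2 hn1).mpr (fun a => (h a).symm))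
  · exact pvSortedDescGt S2 hn2

theorem pvDescSplit_mem (K : List Int) (hK : K.Pairwise (· > ·)) (c : Int) (hc : c ∈ K) :
    ∃ Ka Kb, K = Ka ++ c :: Kb ∧ (∀ d ∈ Ka, c < d) ∧ (∀ d ∈ Kb, d < c) := by
  rcases List.append_of_mem hc with ⟨Ka, Kb, rfl⟩
  rcases List.pairwise_append.mp hK with ⟨_, hcb, hcross⟩
  refine ⟨Ka, Kb, rfl, ?_, ?_⟩
  · intro d hd; exact hcross d hd c (by simp)
  · intro d hd; exact (List.pairwise_cons.mp hcb).1 d hd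

theorem pvStab (ys : List (String × Int)) :
    PySem.List.sorted ys (fun x => x.2) true
      = List.flatMap (fun c => ys.filter (fun y => y.2 == c))
          (PySem.List.sorted (PySem.Set.ofList (ys.map (fun y => y.2))) (fun x => x) true) := by
  induction ys using List.reverseRecOn with
  | nil => rfl
  | append_singleton ys x ih =>
    have hGmem : ∀ (c' : Int) (y : String × Int), y ∈ ys.filter (fun y => y.2 == c') → y.2 = c' := by
      intro c' y hy
      simpa using (List.of_mem_filter hy)
    have hG' : ∀ (c' : Int), (ys ++ [x]).filter (fun y => y.2 == c')
        = ys.filter (fun y => y.2 == c') ++ (if x.2 = c' then [x] else []) := by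
      intro c'
      rw [List.filter_append, List.filter_singleton]
      by_cases h : x.2 = c'
      · simp [h]
      · have hb : (x.2 == c') = false := beq_eq_false_iff_ne.mpr h
        simp [hb, h]
    have hSnd : (PySem.Set.ofList (ys.map (fun y => y.2))).Nodup := PySem.Set.nodup_ofList _
    have hKperm := PySem.List.sorted_perm (PySem.Set.ofList (ys.map (fun y => y.2))) (fun x => x) true
    have hKgt := pvSortedDescGt _ hSnd
    have hmap : (ys ++ [x]).map (fun y => y.2) = ys.map (fun y => y.2) ++ [x.2] := by simp
    rw [pvSorted_rev_append, ih, hmap, PySem.Set.ofList_append_singleton]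
    by_cases hc : x.2 ∈ PySem.Set.ofList (ys.map (fun y => y.2))
    · -- existing count value
      have hadd : PySem.Set.add (PySem.Set.ofList (ys.map (fun y => y.2))) x.2
          = PySem.Set.ofList (ys.map (fun y => y.2)) := by
        simp [PySem.Set.add, PySem.Set.contains, hc]
      rw [hadd]
      have hcK : x.2 ∈ PySem.List.sorted (PySem.Set.ofList (ys.map (fun y => y.2))) (fun x => x) true :=
        (hKperm.mem_iff).mpr hc
      rcases pvDescSplit_mem _ hKgt _ hcK with ⟨Ka, Kb, hKeq, hKa, hKb⟩
      rw [hKeq]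
      have hcKa : x.2 ∉ Ka := fun h => lt_irrefl _ (hKa _ h)
      have hcKb : x.2 ∉ Kb := fun h => lt_irrefl _ (hKb _ h)
      rw [List.flatMap_append, List.flatMap_cons, List.flatMap_append, List.flatMap_cons]
      rw [← List.append_assoc, ← List.append_assoc]
      rw [pvInsertBy_append_not _ x _ _ (by
        intro y hy
        rcases List.mem_append.mp hy with hy | hy
        · rcases List.mem_flatMap.mp hy with ⟨c', hc', hyc⟩
          have : x.2 < c' := hKa c' hc'
          have hy2 := hGmem c' y hyc
          simp [decide_eq_false_iff_not, hy2]
          omega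
        · have hy2 := hGmem x.2 y hy
          simp [hy2])]
      rw [pvInsertBy_cons_of_head _ x _ (by
        intro y hy
        rcases List.mem_flatMap.mp hy with ⟨c', hc', hyc⟩
        have h1 : c' < x.2 := hKb c' hc'
        have hy2 := hGmem c' y hyc
        simp [hy2]
        omega)]
      have hKaG : List.flatMap (fun c => (ys ++ [x]).filter (fun y => y.2 == c)) Ka
          = List.flatMap (fun c => ys.filter (fun y => y.2 == c)) Ka := by
        apply List.flatMap_congr
        intro c' hc'
        rw [hG', if_neg (by intro h; exact hcKa (h ▸ hc')), List.append_nil]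
      have hKbG : List.flatMap (fun c => (ys ++ [x]).filter (fun y => y.2 == c)) Kb
          = List.flatMap (fun c => ys.filter (fun y => y.2 == c)) Kb := by
        apply List.flatMap_congr
        intro c' hc'
        rw [hG', if_neg (by intro h; exact hcKb (h ▸ hc')), List.append_nil]
      rw [hKaG, hKbG, hG' x.2, if_pos rfl]
      simp
    · -- new count value
      have hadd : PySem.Set.add (PySem.Set.ofList (ys.map (fun y => y.2))) x.2
          = PySem.Set.ofList (ys.map (fun y => y.2)) ++ [x.2] := by
        simp [PySem.Set.add, PySem.Set.contains, hc]
      rw [hadd]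
      have hcK : x.2 ∉ PySem.List.sorted (PySem.Set.ofList (ys.map (fun y => y.2))) (fun x => x) true :=
        fun h => hc (hKperm.mem_iff.mp h)
      have hGc : ys.filter (fun y => y.2 == x.2) = [] := by
        rw [List.filter_eq_nil_iff]
        intro y hy hbeq
        exact hc (by
          have : y.2 = x.2 := by simpa using hbeq
          exact (PySem.Set.mem_ofList _ _).mpr (this ▸ List.mem_map_of_mem hy))
      set K := PySem.List.sorted (PySem.Set.ofList (ys.map (fun y => y.2))) (fun x => x) true with hKdef
      set Ka := K.takeWhile (fun d => decide (x.2 < d)) with hKadef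
      set Kb := K.dropWhile (fun d => decide (x.2 < d)) with hKbdef
      have hKeq : K = Ka ++ Kb := (List.takeWhile_append_dropWhile).symm
      have hKa : ∀ d ∈ Ka, x.2 < d := fun d hd => by simpa using List.mem_takeWhile_imp hd
      have hKb : ∀ d ∈ Kb, d < x.2 := pvDescDropWhile_lt _ K hKgt hcK
      have hcKa : x.2 ∉ Ka := fun h => lt_irrefl _ (hKa _ h)
      have hcKb : x.2 ∉ Kb := fun h => lt_irrefl _ (hKb _ h)
      have hsortednew : PySem.List.sorted (PySem.Set.ofList (ys.map (fun y => y.2)) ++ [x.2]) (fun x => x) true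
          = Ka ++ x.2 :: Kb := by
        apply PySem.List.sorted_rev_eq_of_perm_of_pairwise_gt
        · refine (List.perm_middle).trans ?_
          rw [← hKeq]
          exact (hKperm.cons x.2).trans (List.perm_append_comm (l₁ := [x.2]))
        · have hKagt : Ka.Pairwise (· > ·) := by
            rw [hKadef]; exact List.Pairwise.sublist (List.takeWhile_sublist _) hKgt
          have hKbgt : Kb.Pairwise (· > ·) := by
            rw [hKbdef]; exact List.Pairwise.sublist (List.dropWhile_sublist _) hKgt
          rw [List.pairwise_append]
          refine ⟨hKagt, List.pairwise_cons.mpr ⟨fun d hd => hKb d hd, hKbgt⟩, ?_⟩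
          · intro a ha b hb
            rcases List.mem_cons.mp hb with rfl | hb'
            · exact hKa a ha
            · exact lt_trans (hKb b hb') (hKa a ha)
      rw [hsortednew]
      conv_lhs => rw [hKeq]
      rw [List.flatMap_append, List.flatMap_append, List.flatMap_cons]
      rw [pvInsertBy_append_not _ x _ _ (by
        intro y hy
        rcases List.mem_flatMap.mp hy with ⟨c', hc', hyc⟩
        have : x.2 < c' := hKa c' hc'
        have hy2 := hGmem c' y hyc
        simp [hy2]
        omega)]
      rw [pvInsertBy_cons_of_head _ x _ (by
        intro y hy
        rcases List.mem_flatMap.mp hy with ⟨c', hc', hyc⟩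
        have h1 : c' < x.2 := hKb c' hc'
        have hy2 := hGmem c' y hyc
        simp [hy2]
        omega)]
      have hKaG : List.flatMap (fun c => (ys ++ [x]).filter (fun y => y.2 == c)) Ka
          = List.flatMap (fun c => ys.filter (fun y => y.2 == c)) Ka := by
        apply List.flatMap_congr
        intro c' hc'
        rw [hG', if_neg (by intro h; exact hcKa (h ▸ hc')), List.append_nil]
      have hKbG : List.flatMap (fun c => (ys ++ [x]).filter (fun y => y.2 == c)) Kb
          = List.flatMap (fun c => ys.filter (fun y => y.2 == c)) Kb := by
        apply List.flatMap_congr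
        intro c' hc'
        rw [hG', if_neg (by intro h; exact hcKb (h ▸ hc')), List.append_nil]
      rw [hKaG, hKbG, hG' x.2, if_pos rfl, hGc]
      simp
theorem pvIntercalateNilCons (a : List Char) (l : List (List Char)) :
    List.intercalate [] (a :: l) = a ++ List.intercalate [] l := by
  cases l with
  | nil => simp [List.intercalate]
  | cons b l' => simp [List.intercalate, List.intersperse]

theorem pvJoinNilCons (a : String) (parts : List String) :
    PySem.Str.join "" (a :: parts) = a ++ PySem.Str.join "" parts := by
  apply String.toList_inj.mp
  rw [String.toList_append, PySem.Str.toList_join, PySem.Str.toList_join]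
  simp [PySem.Chars.join, pvIntercalateNilCons]

theorem pvStrFold (l : List (String × Int)) : ∀ (s : String),
    l.foldl (fun s x => s ++ x.1) s = s ++ PySem.Str.join "" (l.map (fun x => x.1)) := by
  induction l with
  | nil =>
      intro s
      apply String.toList_inj.mp
      simp [PySem.Str.toList_join, PySem.Chars.join, List.intercalate]
  | cons y ys ih =>
      intro s
      rw [List.foldl_cons, ih, List.map_cons, pvJoinNilCons, String.append_assoc]
theorem pvGroupGetD (line : List (String × Int)) (c : Int) :
    (line.foldl (fun d x => d.modify x.2 [] (fun v => v ++ [x])) PySem.Dict.empty).getD c []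
      = line.filter (fun y => y.2 == c) := by
  rw [show line.foldl (fun d x => d.modify x.2 [] (fun v => v ++ [x])) PySem.Dict.empty
      = (line.map (fun x => (x.2, x))).foldl (fun d p => d.modify p.1 [] (fun v => v ++ [p.2]))
          PySem.Dict.empty from (List.foldl_map (f := fun x : String × Int => (x.2, x))
            (g := fun d p => d.modify p.1 [] (fun v => v ++ [p.2])) (l := line)
            (init := PySem.Dict.empty)).symm]
  rw [PySem.Dict.getD_foldl_modify_append]
  simp [List.filter_map, Function.comp_def]

theorem pvGroupKeys (line : List (String × Int)) :
    (line.foldl (fun d x => d.modify x.2 [] (fun v => v ++ [x])) PySem.Dict.empty).keys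
      = PySem.Set.ofList (line.map (fun x => x.2)) := by
  rw [PySem.Dict.keys_foldl_modify_key line (fun x => x.2) [] (fun _ x => fun v => v ++ [x])]
  rw [PySem.Dict.keys_empty, PySem.Set.update_nil_left]

theorem pvGroupKeysNodup (line : List (String × Int)) :
    (line.foldl (fun d x => d.modify x.2 [] (fun v => v ++ [x])) PySem.Dict.empty).keys.Nodup := by
  exact PySem.Dict.nodup_keys_foldl_modify_key line (fun x => x.2) [] (fun _ x => fun v => v ++ [x])
    PySem.Dict.empty (by simp)

theorem pvStrFold0 (l : List (String × Int)) :
    l.foldl (fun s x => s ++ x.1) "" = PySem.Str.join "" (l.map (fun x => x.1)) := by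
  rw [pvStrFold]
  apply String.toList_inj.mp
  rw [String.toList_append]
  simp

theorem pvAchain (line : List (String × Int)) :
    sort_top_5 line = PySem.Str.join "" ((List.flatMap
        (fun c => PySem.List.sorted (line.filter (fun y => y.2 == c)) (fun x => x.1) false)
        (PySem.List.sorted (PySem.Set.ofList (line.map (fun x => x.2))) (fun x => x) true)).map
          (fun x => x.1)) := by
  simp only [sort_top_5]
  have hnd0 := pvGroupKeysNodup line
  have hkeys0 := pvGroupKeys line
  set splits0 := line.foldl (fun d x => d.modify x.2 [] (fun v => v ++ [x])) PySem.Dict.empty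
    with hs0
  set splits2 := PySem.Dict.mk (splits0.items.map
    (fun p => (p.1, PySem.List.sorted p.2 (fun x => x.1) false))) with hs2
  have hkeys2 : splits2.keys = splits0.keys := by
    simp only [hs2, PySem.Dict.keys, List.map_map, Function.comp_def]
  have hnd2 : splits2.keys.Nodup := by rw [hkeys2]; exact hnd0
  have hgetD2 : ∀ c ∈ splits0.keys, splits2.getD c []
      = PySem.List.sorted (line.filter (fun y => y.2 == c)) (fun x => x.1) false := by
    intro c hc
    have hitems0 := PySem.Dict.items_eq_map_keys splits0 hnd0 []
    have hmem : (c, PySem.List.sorted (splits0.getD c []) (fun x => x.1) false)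
        ∈ splits2.items := by
      show _ ∈ splits0.items.map _
      rw [hitems0, List.map_map]
      exact List.mem_map.mpr ⟨c, hc, rfl⟩
    have hg := PySem.Dict.getD_of_mem_items splits2 hmem hnd2 []
    rw [hg, hs0, pvGroupGetD]
  rw [PySem.List.foldl_append_eq_flatMap (fun k => splits2.getD k [])
    (PySem.List.sorted splits2.keys (fun x => x) true) [], List.nil_append, pvStrFold0]
  have hkv : PySem.List.sorted splits2.keys (fun x => x) true
      = PySem.List.sorted (PySem.Set.ofList (line.map (fun x => x.2))) (fun x => x) true := by
    rw [hkeys2, hkeys0]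
  rw [hkv]
  congr 1
  congr 1
  apply List.flatMap_congr
  intro k hk
  apply hgetD2
  rw [hkeys0]
  exact (PySem.List.mem_sorted _ _ _ _).mp hk

theorem pvBchain (line : List (String × Int)) :
    sort_top_5_alt line = PySem.Str.join "" ((List.flatMap
        (fun c => PySem.List.sorted (line.filter (fun y => y.2 == c)) (fun x => x.1) false)
        (PySem.List.sorted (PySem.Set.ofList (line.map (fun x => x.2))) (fun x => x) true)).map
          (fun x => x.1)) := by
  simp only [sort_top_5_alt]
  rw [pvStab]
  have hkey : PySem.List.sorted
      (PySem.Set.ofList ((PySem.List.sorted line (fun x => x.1) false).map (fun y => y.2)))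
      (fun x => x) true
      = PySem.List.sorted (PySem.Set.ofList (line.map (fun x => x.2))) (fun x => x) true := by
    apply pvSortedDesc_congr _ _ (PySem.Set.nodup_ofList _) (PySem.Set.nodup_ofList _)
    intro a
    rw [PySem.Set.mem_ofList, PySem.Set.mem_ofList]
    exact ((PySem.List.sorted_perm line (fun x => x.1) false).map (fun y => y.2)).mem_iff
  rw [hkey]
  congr 1
  congr 1
  apply List.flatMap_congr
  intro c _
  exact pvFilter_sorted line (fun x => x.1) (fun y => y.2 == c)

-- ===== VERDICT (by name: the statement is the Claim_ definition above) =====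
theorem sort_top_5_spec : Claim_equal_sort_top_5 := by
  intro line _
  unfold Spec_sort_top_5
  rw [pvAchain, pvBchain]
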